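-- pv_equiv track=rewrite | github.com/AzadNikarthil/mydreamz | populate_arbitrage.py | is_traingle_arbitrash
-- ===== SOURCE A (Python) =====
-- import collections
--
-- def is_traingle_arbitrash(combi):
--     d1 = collections.Counter(k[0] for k in combi)
--     d2 = collections.Counter(k[1] for k in combi)
--     d3 = d1 + d2
--     l = d3.values()
--     for i in l:
--         if i != 2:
--             return False
--     return True
-- ===== SOURCE B (Python) =====
-- def is_traingle_arbitrash(combi):
--     # sort-then-scan: flatten both positions, sort, require every run of equal
--     # symbols to have length exactly 2
--     flat = sorted(s for k in combi for s in (k[0], k[1]))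
--     while flat:
--         head = flat[0]
--         run = 1
--         while run < len(flat) and flat[run] == head:
--             run += 1
--         if run != 2:
--             return False
--         flat = flat[run:]
--     return True
-- ===== Notes on version B (the rewrite author's own statement) =====
-- stated objective: alternative
-- what changed: Replaces the two Counters plus Counter addition and a values scan with a flatten-sort-then-scan pass that checks every run of equal adjacent symbols has length exactly 2.
import Mathlib
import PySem

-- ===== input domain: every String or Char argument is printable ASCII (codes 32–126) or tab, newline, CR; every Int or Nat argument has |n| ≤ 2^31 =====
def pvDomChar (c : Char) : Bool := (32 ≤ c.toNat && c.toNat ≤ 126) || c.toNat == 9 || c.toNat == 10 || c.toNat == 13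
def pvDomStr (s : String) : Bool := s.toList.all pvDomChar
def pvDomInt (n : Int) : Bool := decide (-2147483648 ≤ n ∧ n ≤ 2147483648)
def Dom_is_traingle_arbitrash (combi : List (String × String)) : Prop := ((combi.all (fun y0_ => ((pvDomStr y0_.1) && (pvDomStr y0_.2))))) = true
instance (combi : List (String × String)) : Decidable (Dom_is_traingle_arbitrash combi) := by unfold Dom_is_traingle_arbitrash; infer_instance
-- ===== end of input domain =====

-- B replaces A's two Counters + Counter addition + values scan by a flatten-sort-then-scan pass (alternative algorithm, similar cost).

-- ===== PORT A =====
-- Counter.__add__ is not a PySem primitive, so it is transliterated step for step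
-- (exact per CPython: first loop over d1's items inserting newcount = count + d2[k]
-- when positive; second loop over d2's items inserting keys not in d1 with positive count).
def is_traingle_arbitrash (combi : List (String × String)) : Bool :=
  let d1 : PySem.Dict String Int := PySem.Dict.counter (combi.map (fun k => k.1))
  let d2 : PySem.Dict String Int := PySem.Dict.counter (combi.map (fun k => k.2))
  let r1 : PySem.Dict String Int := d1.items.foldl (fun r kv =>
      let newcount := kv.2 + d2.getD kv.1 0
      if 0 < newcount then r.insert kv.1 newcount else r) PySem.Dict.empty
  let d3 : PySem.Dict String Int := d2.items.foldl (fun r kv =>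
      if ¬ d1.contains kv.1 ∧ 0 < kv.2 then r.insert kv.1 kv.2 else r) r1
  -- 'for i in l: if i != 2: return False / return True' = all values equal 2 (short-circuit)
  d3.values.all (fun i => i == 2)

-- ===== PORT B =====
-- the outer while loop of Source B: measure the run of the head, then continue on the remainder
def pvRunScan : List String → Bool
  | [] => true
  | h :: t =>
    if (t.takeWhile (fun x => x == h)).length + 1 = 2
    then pvRunScan (t.dropWhile (fun x => x == h))
    else false
termination_by l => l.length
decreasing_by
  simpa using Nat.lt_succ_of_le (List.length_dropWhile_le _ _)

def is_traingle_arbitrash_alt (combi : List (String × String)) : Bool :=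
  let flat := PySem.List.sorted (combi.flatMap (fun k => [k.1, k.2])) (fun x => x) false
  pvRunScan flat

-- ===== PRECONDITION & SPEC =====
def Spec_is_traingle_arbitrash (combi : List (String × String)) (out : Bool) : Prop := out = is_traingle_arbitrash_alt combi
instance (combi : List (String × String)) (out : Bool) : Decidable (Spec_is_traingle_arbitrash combi out) := by unfold Spec_is_traingle_arbitrash; infer_instance

-- ===== CLAIM (what is proved, stated in full; the proofs are below) =====
def Claim_equal_is_traingle_arbitrash : Prop := ∀ (combi : List (String × String)), Dom_is_traingle_arbitrash combi → Spec_is_traingle_arbitrash combi (is_traingle_arbitrash combi)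

-- ===== LEMMAS AND PROOFS =====

-- a conditional-insert loop is the unconditional loop over the filtered list
lemma foldl_insert_filter {κ ν β : Type} [BEq κ] (l : List β) (p : β → Prop) [DecidablePred p]
    (k : β → κ) (v : β → ν) (d : PySem.Dict κ ν) :
    l.foldl (fun r b => if p b then r.insert (k b) (v b) else r) d
      = (l.filter (fun b => decide (p b))).foldl (fun r b => r.insert (k b) (v b)) d := by
  induction l generalizing d with
  | nil => rfl
  | cons a t ih =>
    simp only [List.foldl_cons, List.filter_cons]
    by_cases h : p a
    · simp only [h, if_true, decide_true]; exact ih _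
    · simp only [h, if_false, decide_false, Bool.false_eq_true]; exact ih _

-- facts about the head run of a ≤-sorted list: the dropped part avoids the head,
-- the head's count is the run length, other counts and membership pass to the rest
lemma run_facts (h : String) (t : List String) (hs : (h :: t).Pairwise (· ≤ ·)) :
    (∀ x ∈ t.dropWhile (fun x => x == h), x ≠ h)
    ∧ (h :: t).count h = (t.takeWhile (fun x => x == h)).length + 1
    ∧ (∀ s, s ≠ h → (h :: t).count s = (t.dropWhile (fun x => x == h)).count s)
    ∧ (∀ s, s ∈ (h :: t) ↔ s = h ∨ s ∈ t.dropWhile (fun x => x == h))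
    ∧ (t.dropWhile (fun x => x == h)).Pairwise (· ≤ ·) := by
  have hsplit : t.takeWhile (fun x => x == h) ++ t.dropWhile (fun x => x == h) = t :=
    List.takeWhile_append_dropWhile
  have hrun : ∀ x ∈ t.takeWhile (fun x => x == h), x = h := by
    intro x hx
    simpa [beq_iff_eq] using List.mem_takeWhile_imp hx
  have hle : ∀ x ∈ t, h ≤ x := (List.pairwise_cons.mp hs).1
  have hrest_pw : (t.dropWhile (fun x => x == h)).Pairwise (· ≤ ·) :=
    hs.sublist ((List.dropWhile_sublist _).trans (List.sublist_cons_self _ _))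
  have hrest_ne : ∀ x ∈ t.dropWhile (fun x => x == h), x ≠ h := by
    intro x hx
    cases hd : t.dropWhile (fun x => x == h) with
    | nil => simp [hd] at hx
    | cons r0 rs =>
      have hr0 : ¬ (r0 == h) = true := by
        have := List.head?_dropWhile_not (fun x => x == h) t
        simp [hd] at this; simpa using this
      have hr0ne : r0 ≠ h := by simpa [beq_iff_eq] using hr0
      have hr0mem : r0 ∈ t := (List.dropWhile_sublist _).subset (by rw [hd]; exact List.mem_cons_self)
      have hlt : h < r0 := lt_of_le_of_ne (hle r0 hr0mem) (Ne.symm hr0ne)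
      rw [hd] at hx
      rcases List.mem_cons.mp hx with rfl | hx'
      · exact hr0ne
      · have hpw := hrest_pw; rw [hd] at hpw
        have hr0x : r0 ≤ x := (List.pairwise_cons.mp hpw).1 x hx'
        intro h0
        rw [h0] at hr0x
        exact absurd hr0x (not_le.mpr hlt)
  have hcount_run_h : (t.takeWhile (fun x => x == h)).count h
      = (t.takeWhile (fun x => x == h)).length :=
    List.count_eq_length.mpr (fun x hx => (hrun x hx).symm)
  have hcount_run_ne : ∀ s, s ≠ h → (t.takeWhile (fun x => x == h)).count s = 0 := by
    intro s hsne
    exact List.count_eq_zero.mpr (fun hm => hsne (hrun s hm))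
  have hcount_rest_h : (t.dropWhile (fun x => x == h)).count h = 0 :=
    List.count_eq_zero.mpr (fun hm => hrest_ne h hm rfl)
  refine ⟨hrest_ne, ?_, ?_, ?_, hrest_pw⟩
  · conv_lhs => rw [← hsplit]
    rw [List.count_cons_self, List.count_append, hcount_run_h, hcount_rest_h]
  · intro s hsne
    conv_lhs => rw [← hsplit]
    rw [List.count_cons_of_ne (Ne.symm hsne), List.count_append, hcount_run_ne s hsne, Nat.zero_add]
  · intro s
    constructor
    · intro hm
      rcases List.mem_cons.mp hm with rfl | hm'
      · exact Or.inl rfl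
      · rw [← hsplit] at hm'
        rcases List.mem_append.mp hm' with hm'' | hm''
        · exact Or.inl (hrun s hm'')
        · exact Or.inr hm''
    · rintro (rfl | hm')
      · exact List.mem_cons_self
      · exact List.mem_cons_of_mem _ (by rw [← hsplit]; exact List.mem_append_right _ hm')

-- pvRunScan on a ≤-sorted list says: every element occurs exactly twice
lemma pvRunScan_iff (l : List String) (hs : l.Pairwise (· ≤ ·)) :
    pvRunScan l = true ↔ ∀ s ∈ l, l.count s = 2 := by
  induction l using pvRunScan.induct with
  | case1 => simp [pvRunScan]
  | case2 h t hc ih =>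
    obtain ⟨hne, hcnth, hcnt, hmem, hpw⟩ := run_facts h t hs
    rw [pvRunScan, if_pos hc, ih hpw]
    constructor
    · intro hall s hsmem
      rcases (hmem s).mp hsmem with rfl | hm'
      · rw [hcnth, hc]
      · rw [hcnt s (hne s hm')]; exact hall s hm'
    · intro hall s hsmem
      rw [← hcnt s (hne s hsmem)]
      exact hall s ((hmem s).mpr (Or.inr hsmem))
  | case3 h t hc =>
    obtain ⟨hne, hcnth, hcnt, hmem, hpw⟩ := run_facts h t hs
    rw [pvRunScan, if_neg hc]
    constructor
    · intro hfalse; cases hfalse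
    · intro hall
      exact absurd (hcnth.symm.trans (hall h List.mem_cons_self)) hc

-- the items of A's Counter sum d3 in closed form
lemma portA_items (combi : List (String × String)) :
    (let d1 : PySem.Dict String Int := PySem.Dict.counter (combi.map (fun k => k.1))
     let d2 : PySem.Dict String Int := PySem.Dict.counter (combi.map (fun k => k.2))
     let r1 : PySem.Dict String Int := d1.items.foldl (fun r kv =>
        let newcount := kv.2 + d2.getD kv.1 0
        if 0 < newcount then r.insert kv.1 newcount else r) PySem.Dict.empty
     (d2.items.foldl (fun r kv =>
        if ¬ d1.contains kv.1 ∧ 0 < kv.2 then r.insert kv.1 kv.2 else r) r1).items)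
    = (PySem.Set.ofList (combi.map (fun k => k.1))).map
        (fun k => (k, ((combi.map (fun x => x.1)).count k + (combi.map (fun x => x.2)).count k : Int)))
      ++ ((PySem.Set.ofList (combi.map (fun k => k.2))).filter
            (fun k => !(decide (k ∈ combi.map (fun x => x.1))))).map
          (fun k => (k, ((combi.map (fun x => x.2)).count k : Int))) := by
  set F := combi.map (fun k => k.1) with hF
  set S := combi.map (fun k => k.2) with hS
  simp only
  -- step 1: the first fold's guard is always true (a counter value is ≥ 1, d2's lookup ≥ 0)
  have h1 : (PySem.Dict.counter (κ := String) F).items.foldl (fun r kv =>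
        let newcount := kv.2 + (PySem.Dict.counter (κ := String) S).getD kv.1 0
        if 0 < newcount then r.insert kv.1 newcount else r) PySem.Dict.empty
      = (PySem.Dict.counter (κ := String) F).items.foldl (fun r kv =>
        r.insert kv.1 (kv.2 + (PySem.Dict.counter (κ := String) S).getD kv.1 0)) PySem.Dict.empty := by
    apply PySem.List.foldl_congr_mem
    intro r kv hkv
    have hpos : 0 < kv.2 + (PySem.Dict.counter (κ := String) S).getD kv.1 0 := by
      rw [PySem.Dict.items_counter] at hkv
      obtain ⟨k, hk, hkeq⟩ := List.mem_map.mp hkv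
      have hkF : k ∈ F := (PySem.Set.mem_ofList _ _).mp hk
      have hc1 : (1 : Nat) ≤ F.count k := List.one_le_count_iff.mpr hkF
      have h2 : kv.2 = (F.count k : Int) := congrArg Prod.snd hkeq.symm
      have h1' : kv.1 = k := congrArg Prod.fst hkeq.symm
      rw [PySem.Dict.getD_counter, h2, h1']
      have : (0:Int) ≤ (S.count k : Int) := Int.natCast_nonneg _
      omega
    simp only [hpos, if_true]
  rw [h1]
  -- step 2: r1's items — fresh distinct keys inserted into an empty dict append
  have hitems1 : ((PySem.Dict.counter (κ := String) F).items.foldl (fun r kv =>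
        r.insert kv.1 (kv.2 + (PySem.Dict.counter (κ := String) S).getD kv.1 0)) PySem.Dict.empty).items
      = (PySem.Set.ofList F).map (fun k => (k, (F.count k : Int) + (S.count k : Int))) := by
    rw [PySem.Dict.items_counter]
    rw [PySem.Dict.items_foldl_insert_fresh
      (l := (PySem.Set.ofList F).map (fun k => (k, (F.count k : Int))))
      (k := fun kv => kv.1)
      (v := fun kv => kv.2 + (PySem.Dict.counter (κ := String) S).getD kv.1 0)
      (d := PySem.Dict.empty)
      (by intro a _; exact PySem.Dict.contains_empty _)
      (by
        have he : ((PySem.Set.ofList F).map (fun k => (k, (F.count k : Int)))).map (fun kv => kv.1)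
            = PySem.Set.ofList F := by simp [Function.comp_def]
        rw [he]; exact PySem.Set.nodup_ofList F)]
    show PySem.Dict.empty.items ++ _ = _
    rw [show (PySem.Dict.empty : PySem.Dict String Int).items = [] from rfl, List.nil_append, List.map_map]
    apply List.map_congr_left
    intro k hk
    simp [PySem.Dict.getD_counter]
  -- step 3: the second fold — keep the guarded items, they are fresh for r1, so they append
  set d2n := (PySem.Dict.counter (κ := String) S) with hd2
  set r1 := (PySem.Dict.counter (κ := String) F).items.foldl (fun r kv =>
        r.insert kv.1 (kv.2 + d2n.getD kv.1 0)) PySem.Dict.empty with hr1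
  rw [foldl_insert_filter d2n.items
      (fun kv => ¬ (PySem.Dict.counter (κ := String) F).contains kv.1 ∧ 0 < kv.2)
      (fun kv => kv.1) (fun kv => kv.2) r1]
  have hfilter : (d2n.items.filter (fun kv =>
        decide (¬ (PySem.Dict.counter (κ := String) F).contains kv.1 ∧ 0 < kv.2)))
      = ((PySem.Set.ofList S).filter (fun k => !(decide (k ∈ F)))).map
          (fun k => (k, (S.count k : Int))) := by
    rw [hd2, PySem.Dict.items_counter, List.filter_map]
    congr 1
    apply List.filter_congr
    intro k hk
    have hkS : k ∈ S := (PySem.Set.mem_ofList _ _).mp hk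
    have hc1 : (1 : Nat) ≤ S.count k := List.one_le_count_iff.mpr hkS
    have hcont : (PySem.Dict.counter (κ := String) F).contains k = decide (k ∈ F) := by
      rw [PySem.Dict.contains_counter]
      simp
    simp only [Function.comp_apply, hcont]
    by_cases hkF : k ∈ F
    · simp [hkF]
    · simp [hkF]
      omega
  rw [hfilter]
  have hkeys1 : r1.keys = PySem.Set.ofList F := by
    show r1.items.map (fun p => p.1) = _
    rw [hitems1]
    rw [List.map_map]
    simp [Function.comp_def]
  rw [PySem.Dict.items_foldl_insert_fresh
      (l := ((PySem.Set.ofList S).filter (fun k => !(decide (k ∈ F)))).map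
          (fun k => (k, (S.count k : Int))))
      (k := fun kv => kv.1) (v := fun kv => kv.2) (d := r1)
      (by
        intro a ha
        obtain ⟨k, hk, rfl⟩ := List.mem_map.mp ha
        have hkmem := List.of_mem_filter hk
        have hknotF : k ∉ F := by simpa using hkmem
        have : ¬ r1.contains k = true := by
          rw [PySem.Dict.contains_iff_mem_keys, hkeys1]
          rw [PySem.Set.mem_ofList]
          exact hknotF
        simpa using this)
      (by
        rw [List.map_map]
        have : ((fun kv => kv.1) ∘ fun k => (k, (S.count k : Int))) = fun k => k := by
          funext k; rfl
        rw [this, List.map_id']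
        exact (PySem.Set.nodup_ofList S).filter _)]
  rw [hitems1]
  simp

-- A's value: every symbol of firsts ++ seconds occurs exactly twice there
lemma portA_iff (combi : List (String × String)) :
    is_traingle_arbitrash combi = true ↔
      ∀ s ∈ (combi.map (fun k => k.1) ++ combi.map (fun k => k.2)),
        (combi.map (fun k => k.1) ++ combi.map (fun k => k.2)).count s = 2 := by
  have hitems := portA_items combi
  unfold is_traingle_arbitrash
  simp only at hitems ⊢
  rw [show ∀ (d : PySem.Dict String Int), d.values = d.items.map (fun p => p.2) from fun _ => rfl]
  rw [hitems]
  set F := combi.map (fun k => k.1) with hF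
  set S := combi.map (fun k => k.2) with hS
  rw [List.map_append, List.all_append, Bool.and_eq_true, List.map_map, List.map_map,
      List.all_map, List.all_map, List.all_eq_true, List.all_eq_true]
  constructor
  · rintro ⟨hl, hr⟩ s hsmem
    rw [List.count_append]
    rcases List.mem_append.mp hsmem with hsF | hsS
    · have := hl s ((PySem.Set.mem_ofList _ _).mpr hsF)
      simp only [Function.comp_apply, beq_iff_eq] at this
      omega
    · by_cases hsF : s ∈ F
      · have := hl s ((PySem.Set.mem_ofList _ _).mpr hsF)
        simp only [Function.comp_apply, beq_iff_eq] at this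
        omega
      · have hmemf : s ∈ (PySem.Set.ofList S).filter (fun k => !(decide (k ∈ F))) := by
          apply List.mem_filter.mpr
          exact ⟨(PySem.Set.mem_ofList _ _).mpr hsS, by simp [hsF]⟩
        have := hr s hmemf
        simp only [Function.comp_apply, beq_iff_eq] at this
        have hcF : F.count s = 0 := List.count_eq_zero.mpr hsF
        omega
  · intro hall
    constructor
    · intro s hsmem
      have hsF : s ∈ F := (PySem.Set.mem_ofList _ _).mp hsmem
      have := hall s (List.mem_append_left _ hsF)
      rw [List.count_append] at this
      simp only [Function.comp_apply, beq_iff_eq]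
      omega
    · intro s hsmem
      obtain ⟨hsS', hnF⟩ := List.mem_filter.mp hsmem
      have hsS : s ∈ S := (PySem.Set.mem_ofList _ _).mp hsS'
      have hsF : s ∉ F := by simpa using hnF
      have := hall s (List.mem_append_right _ hsS)
      rw [List.count_append] at this
      have hcF : F.count s = 0 := List.count_eq_zero.mpr hsF
      simp only [Function.comp_apply, beq_iff_eq]
      omega

-- the flattened list is a permutation of fst-projections ++ snd-projections
lemma flat_perm (combi : List (String × String)) :
    (combi.flatMap (fun k => [k.1, k.2])).Perm
      (combi.map (fun k => k.1) ++ combi.map (fun k => k.2)) := by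
  induction combi with
  | nil => simp
  | cons p t ih =>
    simp only [List.flatMap_cons, List.map_cons, List.cons_append]
    exact ((ih.cons p.2).cons p.1).trans ((List.perm_middle.symm).cons p.1)

-- B's value: the same characterisation, via the sorted permutation
lemma portB_iff (combi : List (String × String)) :
    is_traingle_arbitrash_alt combi = true ↔
      ∀ s ∈ (combi.map (fun k => k.1) ++ combi.map (fun k => k.2)),
        (combi.map (fun k => k.1) ++ combi.map (fun k => k.2)).count s = 2 := by
  unfold is_traingle_arbitrash_alt
  simp only
  set flat := combi.flatMap (fun k => [k.1, k.2]) with hflat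
  have hpw : (PySem.List.sorted flat (fun x => x) false).Pairwise (· ≤ ·) :=
    PySem.List.sorted_pairwise flat (fun x => x)
  have hperm : (PySem.List.sorted flat (fun x => x) false).Perm
      (combi.map (fun k => k.1) ++ combi.map (fun k => k.2)) :=
    (PySem.List.sorted_perm flat (fun x => x) false).trans (flat_perm combi)
  rw [pvRunScan_iff _ hpw]
  constructor
  · intro hall s hsmem
    rw [← hperm.count_eq]
    exact hall s (hperm.mem_iff.mpr hsmem)
  · intro hall s hsmem
    rw [hperm.count_eq]
    exact hall s (hperm.mem_iff.mp hsmem)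

-- ===== VERDICT (by name: the statement is the Claim_ definition above) =====
theorem is_traingle_arbitrash_spec : Claim_equal_is_traingle_arbitrash := by
  intro combi _
  unfold Spec_is_traingle_arbitrash
  have ha := portA_iff combi
  have hb := portB_iff combi
  cases hA : is_traingle_arbitrash combi <;> cases hB : is_traingle_arbitrash_alt combi
  · rfl
  · rw [hA] at ha; rw [hB] at hb
    exact absurd (ha.mpr (hb.mp rfl)) (by simp)
  · rw [hA] at ha; rw [hB] at hb
    exact absurd (hb.mpr (ha.mp rfl)) (by simp)
  · rfl
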